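-- pv_equiv track=rewrite | github.com/lvzongyao/pytorch-image-models | open-set-calibration/map_labels.py | get_samples_without_excluded
-- ===== SOURCE A (Python) =====
-- def get_samples_without_excluded(samples, excluded_labels):
--     """
--     :param samples -
--     :param excluded_labels -
--
--     :returns
--     """
--     #    labels_without_excluded = [x for x in labels if x not in excluded_labels]
--     labels_without_excluded = []
--     x_samples = []
--
--     for x, y in samples:
--         if y not in excluded_labels:
--             labels_without_excluded.append(y)
--             x_samples.append(x)
--
--     return x_samples, labels_without_excluded
-- ===== SOURCE B (Python) =====
-- def get_samples_without_excluded(samples, excluded_labels):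
--     excl = set(excluded_labels)
--     kept = [i for i, (_, y) in enumerate(samples) if y not in excl]
--     return [samples[i][0] for i in kept], [samples[i][1] for i in kept]
-- ===== Notes on version B (the rewrite author's own statement) =====
-- stated objective: alternative
-- what changed: Instead of one interleaved loop appending to two lists, B hashes the excluded labels into a set, computes the list of kept indices in one pass, and then gathers each of the two output lists by indexing samples at those indices in two separate passes.
import Mathlib
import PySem

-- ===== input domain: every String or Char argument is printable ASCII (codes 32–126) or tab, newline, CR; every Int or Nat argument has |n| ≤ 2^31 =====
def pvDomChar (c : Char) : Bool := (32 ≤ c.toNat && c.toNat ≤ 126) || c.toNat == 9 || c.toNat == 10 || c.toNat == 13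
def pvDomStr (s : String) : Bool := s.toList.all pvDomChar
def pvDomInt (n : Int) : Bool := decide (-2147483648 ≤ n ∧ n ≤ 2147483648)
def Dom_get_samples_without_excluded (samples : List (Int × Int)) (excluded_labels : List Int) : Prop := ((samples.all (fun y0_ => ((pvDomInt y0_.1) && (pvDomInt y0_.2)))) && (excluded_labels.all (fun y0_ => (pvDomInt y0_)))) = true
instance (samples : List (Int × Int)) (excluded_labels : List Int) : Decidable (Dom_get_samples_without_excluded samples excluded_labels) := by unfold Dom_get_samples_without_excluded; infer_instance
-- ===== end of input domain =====

-- B hashes excluded labels into a set, collects the kept indices in one pass, then gathers the two output lists by indexing samples at those indices in two separate passes (instead of A's interleaved loop with two appends).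


-- ===== PORT A =====
-- loop over samples keeping two accumulators (x_samples, labels_without_excluded), appending to each
def get_samples_without_excluded (samples : List (Int × Int)) (excluded_labels : List Int) : List Int × List Int :=
  let acc := samples.foldl (fun st xy =>
    if ¬ excluded_labels.contains xy.2 then (st.1 ++ [xy.1], st.2 ++ [xy.2]) else st) ([], [])
  (acc.1, acc.2)

-- ===== PORT B =====
-- B: excl = set(excluded_labels); kept = indices whose label is not excluded; then two gather passes samples[i][0] / samples[i][1].
-- samples[i] is ported with PySem.List.pyGet? (none = IndexError, unreachable: every i comes from enumerate(samples)).
def get_samples_without_excluded_alt (samples : List (Int × Int)) (excluded_labels : List Int) : List Int × List Int :=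
  let excl : PySem.Set Int := PySem.Set.ofList excluded_labels
  let kept : List Int := ((PySem.List.enumerate samples 0).filter (fun p => ¬ PySem.Set.contains excl p.2.2)).map Prod.fst
  (kept.filterMap (fun i => (PySem.List.pyGet? samples i).map Prod.fst),
   kept.filterMap (fun i => (PySem.List.pyGet? samples i).map Prod.snd))

-- ===== PRECONDITION & SPEC =====
def Spec_get_samples_without_excluded (samples : List (Int × Int)) (excluded_labels : List Int) (out : List Int × List Int) : Prop := out = get_samples_without_excluded_alt samples excluded_labels
instance (samples : List (Int × Int)) (excluded_labels : List Int) (out : List Int × List Int) : Decidable (Spec_get_samples_without_excluded samples excluded_labels out) := by unfold Spec_get_samples_without_excluded; infer_instance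

-- ===== CLAIM (what is proved, stated in full; the proofs are below) =====
def Claim_equal_get_samples_without_excluded : Prop := ∀ (samples : List (Int × Int)) (excluded_labels : List Int), Dom_get_samples_without_excluded samples excluded_labels → Spec_get_samples_without_excluded samples excluded_labels (get_samples_without_excluded samples excluded_labels)

-- ===== LEMMAS AND PROOFS =====

-- A's loop accumulates exactly the filtered projections
lemma gswe_loop (samples : List (Int × Int)) (excluded_labels : List Int)
    (xs ls : List Int) :
    samples.foldl (fun st xy =>
      if ¬ excluded_labels.contains xy.2 then (st.1 ++ [xy.1], st.2 ++ [xy.2]) else st) (xs, ls)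
    = (xs ++ (samples.filter (fun xy => ¬ excluded_labels.contains xy.2)).map Prod.fst,
       ls ++ (samples.filter (fun xy => ¬ excluded_labels.contains xy.2)).map Prod.snd) := by
  induction samples generalizing xs ls with
  | nil => simp
  | cons p rest ih =>
    rw [List.foldl_cons]
    by_cases h : excluded_labels.contains p.2
    · rw [if_neg (by simpa using h), ih]
      have h' : p.2 ∈ excluded_labels := by simpa using h
      simp [h']
    · rw [if_pos (by simpa using h), ih]
      have h' : p.2 ∉ excluded_labels := by simpa using h
      simp [h']

-- gathering samples[i] over the kept indices equals mapping over the filtered list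
lemma gswe_gather (samples : List (Int × Int)) (P : Int → Bool) (f : Int × Int → Int) :
    ((((PySem.List.enumerate samples 0).filter (fun p => P p.2.2)).map Prod.fst).filterMap
        (fun i => (PySem.List.pyGet? samples i).map f))
    = (samples.filter (fun s => P s.2)).map f := by
  rw [List.filterMap_map]
  have hmem : ∀ p ∈ (PySem.List.enumerate samples 0).filter (fun p => P p.2.2),
      ((fun i => (PySem.List.pyGet? samples i).map f) ∘ Prod.fst) p = some (f p.2) := by
    intro p hp
    have hp' := List.mem_of_mem_filter hp
    rcases (PySem.List.mem_enumerate_iff samples 0 p).1 hp' with ⟨k, hk, rfl⟩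
    simp [Function.comp, hk]
  rw [List.filterMap_congr hmem]
  have : ((PySem.List.enumerate samples 0).filter (fun p => P p.2.2)).filterMap
      (fun p => some (f p.2)) =
      ((PySem.List.enumerate samples 0).filter (fun p => P p.2.2)).map (fun p => f p.2) := by
    rw [List.filterMap_eq_map_iff_forall_eq_some.2 (by intro p _; rfl)]
  rw [this]
  have h2 : samples.filter (fun s => P s.2)
      = (((PySem.List.enumerate samples 0).filter (fun p => P p.2.2)).map Prod.snd) := by
    have := PySem.List.map_snd_enumerate samples (0 : Int)
    calc samples.filter (fun s => P s.2)
        = ((PySem.List.enumerate samples 0).map Prod.snd).filter (fun s => P s.2) := by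
          rw [this]
      _ = ((PySem.List.enumerate samples 0).filter (fun p => P p.2.2)).map Prod.snd := by
          rw [List.filter_map]; rfl
  rw [h2, List.map_map]; rfl

-- ===== VERDICT (by name: the statement is the Claim_ definition above) =====
theorem get_samples_without_excluded_spec : Claim_equal_get_samples_without_excluded := by
  intro samples excluded_labels _
  unfold Spec_get_samples_without_excluded get_samples_without_excluded get_samples_without_excluded_alt
  simp only [gswe_loop, List.nil_append]
  rw [gswe_gather samples (fun y => decide ¬((PySem.Set.ofList excluded_labels).contains y = true)) Prod.fst,
      gswe_gather samples (fun y => decide ¬((PySem.Set.ofList excluded_labels).contains y = true)) Prod.snd]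
  have hfil : samples.filter (fun xy => decide ¬(excluded_labels.contains xy.2 = true))
      = samples.filter (fun s => decide ¬((PySem.Set.ofList excluded_labels).contains s.2 = true)) := by
    apply List.filter_congr
    intro p _
    simp [PySem.Set.mem_ofList]
  rw [hfil]
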